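-- pv_equiv track=rewrite | github.com/erturkmemmedli/Hacker-Rank-Solutions | Data Structures/Advanced/cricket.py | solve
-- ===== SOURCE A (Python) =====
-- from bisect import bisect_left, bisect_right
--
-- def solve(shots, players):
--     # Write your code here
--     shots.sort(key=lambda x: x[0])
--     begins = [r[0] for r in shots]
--
--     shots.sort(key=lambda x: x[1])
--     ends = [r[1] for r in shots]
--
--     ans = len(shots) * len(players)
--
--     for p in players:
--         x = bisect_left(ends, p[0])
--         y = len(ends) - bisect_right(begins, p[1])
--
--         ans -= x
--         ans -= y
--
--     return ans
-- ===== SOURCE B (Python) =====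
-- def solve(shots, players):
--     # Direct per-player counting (no sorting, no binary search); does not
--     # mutate shots (A sorts it in place) -- return value is identical.
--     n = len(shots)
--     total = 0
--     for p0, p1 in players:
--         misses_before = sum(1 for b, e in shots if e < p0)
--         misses_after = sum(1 for b, e in shots if b > p1)
--         total += n - misses_before - misses_after
--     return total
-- ===== Notes on version B (the rewrite author's own statement) =====
-- stated objective: simpler
-- what changed: Replaces A's double sort plus per-player binary searches (bisect_left/bisect_right) with direct per-player linear counts of shots ending before p0 and starting after p1, with no sorting and no mutation of shots.
import Mathlib
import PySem

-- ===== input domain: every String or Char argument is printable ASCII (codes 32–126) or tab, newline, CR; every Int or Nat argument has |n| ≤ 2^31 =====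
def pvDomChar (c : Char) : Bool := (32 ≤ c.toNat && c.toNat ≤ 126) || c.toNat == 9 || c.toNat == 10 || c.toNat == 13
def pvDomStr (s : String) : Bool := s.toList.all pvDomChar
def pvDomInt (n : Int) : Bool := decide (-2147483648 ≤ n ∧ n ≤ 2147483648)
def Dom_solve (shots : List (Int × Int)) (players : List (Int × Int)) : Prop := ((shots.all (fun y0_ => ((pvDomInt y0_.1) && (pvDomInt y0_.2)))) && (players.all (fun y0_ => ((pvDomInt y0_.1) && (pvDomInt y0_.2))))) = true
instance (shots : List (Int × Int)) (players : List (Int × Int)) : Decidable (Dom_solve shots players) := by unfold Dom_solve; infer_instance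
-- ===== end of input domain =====

-- B replaces A's double sort + per-player bisect with direct per-player linear counts
-- (objective: simpler, no sorting); equivalence is about the RETURN VALUE only:
-- Python A sorts `shots` in place, Python B leaves its arguments unmodified.

-- ===== PORT A =====
def solve (shots : List (Int × Int)) (players : List (Int × Int)) : Int :=
  let shots1 := PySem.List.sorted shots (fun x => x.1)
  let begins := shots1.map (fun r => r.1)
  let shots2 := PySem.List.sorted shots1 (fun x => x.2)
  let ends := shots2.map (fun r => r.2)
  players.foldl
    (fun ans p =>
      let x : Int := (PySem.List.bisectLeft ends p.1 : Int)
      let y : Int := (ends.length : Int) - (PySem.List.bisectRight begins p.2 : Int)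
      ans - x - y)
    ((shots2.length : Int) * (players.length : Int))

-- ===== PORT B =====
def solve_alt (shots : List (Int × Int)) (players : List (Int × Int)) : Int :=
  let n : Int := (shots.length : Int)
  players.foldl
    (fun total p =>
      let missesBefore : Int := (shots.countP (fun s => s.2 < p.1) : Int)
      let missesAfter : Int := (shots.countP (fun s => p.2 < s.1) : Int)
      total + (n - missesBefore - missesAfter))
    0

-- ===== PRECONDITION & SPEC =====
def Spec_solve (shots : List (Int × Int)) (players : List (Int × Int)) (out : Int) : Prop := out = solve_alt shots players
instance (shots : List (Int × Int)) (players : List (Int × Int)) (out : Int) : Decidable (Spec_solve shots players out) := by unfold Spec_solve; infer_instance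

-- ===== CLAIM (what is proved, stated in full; the proofs are below) =====
def Claim_equal_solve : Prop := ∀ (shots : List (Int × Int)) (players : List (Int × Int)), Dom_solve shots players → Spec_solve shots players (solve shots players)

-- ===== LEMMAS AND PROOFS =====

-- On a list with a "boundary" index b (everything before b satisfies p, nothing from b on does), countP p = b.
theorem pv_countP_boundary (l : List Int) (p : Int → Bool) (b : Nat) (hb : b ≤ l.length)
    (h1 : ∀ j (hj : j < l.length), j < b → p l[j])
    (h2 : ∀ j (hj : j < l.length), b ≤ j → ¬ p l[j] = true) :
    l.countP p = b := by
  have hsplit : l = l.take b ++ l.drop b := (List.take_append_drop b l).symm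
  have htake : (l.take b).countP p = b := by
    rw [List.countP_eq_length.mpr, List.length_take]
    · omega
    · intro a ha
      obtain ⟨i, hi, rfl⟩ := List.mem_iff_getElem.mp ha
      have hi' : i < b := by
        have := List.length_take (i := b) (l := l); omega
      rw [List.getElem_take]
      exact h1 i (by omega) hi'
  have hdrop : (l.drop b).countP p = 0 := by
    rw [List.countP_eq_zero]
    intro a ha
    obtain ⟨i, hi, rfl⟩ := List.mem_iff_getElem.mp ha
    rw [List.getElem_drop]
    have hi' : b + i < l.length := by
      have := List.length_drop (l := l) (i := b); omega
    exact h2 (b + i) hi' (by omega)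
  calc l.countP p = (l.take b ++ l.drop b).countP p := by rw [← hsplit]
    _ = b := by rw [List.countP_append, htake, hdrop]; omega


theorem pv_bisectLeft_countP (l : List Int) (q : Int)
    (hs : l.Pairwise (fun a b => a ≤ b)) :
    PySem.List.bisectLeft l q = l.countP (fun a => a < q) := by
  obtain ⟨hb, h1, h2⟩ := PySem.List.bisectLeft_spec l q hs
  exact (pv_countP_boundary l _ _ hb
    (fun j hj hlt => by simpa using h1 j hj hlt)
    (fun j hj hge => by simpa using h2 j hj hge)).symm

theorem pv_bisectRight_countP (l : List Int) (q : Int)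
    (hs : l.Pairwise (fun a b => a ≤ b)) :
    PySem.List.bisectRight l q = l.countP (fun a => a ≤ q) := by
  obtain ⟨hb, h1, h2⟩ := PySem.List.bisectRight_spec l q hs
  exact (pv_countP_boundary l _ _ hb
    (fun j hj hlt => by simpa using h1 j hj hlt)
    (fun j hj hge => by simpa using h2 j hj hge)).symm

-- A's x-count equals B's direct count of shots ending before q.
theorem pv_x_eq (shots : List (Int × Int)) (q : Int) :
    PySem.List.bisectLeft
      ((PySem.List.sorted (PySem.List.sorted shots (fun x => x.1)) (fun x => x.2)).map
        (fun r => r.2)) q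
      = shots.countP (fun s => s.2 < q) := by
  set s2 := PySem.List.sorted (PySem.List.sorted shots (fun x => x.1)) (fun x => x.2) with hs2
  have hsorted : (s2.map (fun r => r.2)).Pairwise (fun a b => a ≤ b) :=
    PySem.List.sorted_map_key_pairwise _ _
  rw [pv_bisectLeft_countP _ _ hsorted, List.countP_map]
  have hperm : s2.Perm shots :=
    (PySem.List.sorted_perm _ _ _).trans (PySem.List.sorted_perm _ _ _)
  exact hperm.countP_eq _

-- A's y-count equals B's direct count of shots beginning after q.
theorem pv_y_eq (shots : List (Int × Int)) (q : Int) :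
    ((shots.length : Int)) - (PySem.List.bisectRight
      ((PySem.List.sorted shots (fun x => x.1)).map (fun r => r.1)) q : Int)
      = (shots.countP (fun s => q < s.1) : Int) := by
  set s1 := PySem.List.sorted shots (fun x => x.1) with hs1
  have hsorted : (s1.map (fun r => r.1)).Pairwise (fun a b => a ≤ b) :=
    PySem.List.sorted_map_key_pairwise _ _
  have hperm : s1.Perm shots := PySem.List.sorted_perm _ _ _
  rw [pv_bisectRight_countP _ _ hsorted, List.countP_map, hperm.countP_eq]
  have hsplit : shots.countP ((fun a => a ≤ q) ∘ fun r => (r : Int × Int).1)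
      + shots.countP (fun s => q < s.1) = shots.length := by
    have h := List.length_eq_countP_add_countP (l := shots) (p := ((fun a => a ≤ q) ∘ fun r => (r : Int × Int).1))
    rw [h]
    congr 1
    apply List.countP_congr
    intro s _
    simp [Function.comp]
  omega

-- The two folds agree when the A-accumulator exceeds the B-accumulator by n * (#players left).
theorem pv_foldl_eq (shots : List (Int × Int)) (ps : List (Int × Int)) :
    ∀ (a b : Int), a = b + (shots.length : Int) * (ps.length : Int) →
    ps.foldl
      (fun ans p =>
        ans - (PySem.List.bisectLeft
            ((PySem.List.sorted (PySem.List.sorted shots (fun x => x.1)) (fun x => x.2)).map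
              (fun r => r.2)) p.1 : Int)
          - (((( PySem.List.sorted (PySem.List.sorted shots (fun x => x.1)) (fun x => x.2)).map
              (fun r => r.2)).length : Int)
            - (PySem.List.bisectRight
                ((PySem.List.sorted shots (fun x => x.1)).map (fun r => r.1)) p.2 : Int))) a
    = ps.foldl
      (fun total p =>
        total + ((shots.length : Int) - (shots.countP (fun s => s.2 < p.1) : Int)
          - (shots.countP (fun s => p.2 < s.1) : Int))) b := by
  induction ps with
  | nil => intro a b h; simpa using h
  | cons p t ih =>
    intro a b h
    simp only [List.foldl_cons]
    apply ih
    have hlen : ((PySem.List.sorted (PySem.List.sorted shots (fun x => x.1)) (fun x => x.2)).map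
        (fun r => r.2)).length = shots.length := by
      rw [List.length_map]
      exact ((PySem.List.sorted_perm _ _ _).trans (PySem.List.sorted_perm _ _ _)).length_eq
    rw [pv_x_eq shots p.1, hlen, pv_y_eq shots p.2]
    simp only [List.length_cons] at h
    push_cast at h ⊢
    linarith

-- ===== VERDICT (by name: the statement is the Claim_ definition above) =====
theorem solve_spec : Claim_equal_solve := by
  intro shots players _
  show solve shots players = solve_alt shots players
  unfold solve solve_alt
  simp only []
  apply pv_foldl_eq
  have hlen : (PySem.List.sorted (PySem.List.sorted shots (fun x => x.1)) (fun x => x.2)).length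
      = shots.length :=
    ((PySem.List.sorted_perm _ _ _).trans (PySem.List.sorted_perm _ _ _)).length_eq
  rw [hlen]; ring
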